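-- pv_equiv track=rewrite | github.com/bredeson/compression | src/compression/filenames.py | split_suffix
-- ===== SOURCE A (Python) =====
-- def split_suffix(filename, suffixes=()):
--     tempname = filename.lower()
--     if isinstance(tempname, bytes):
--         tempname = tempname.decode()
--     for suffix in sorted(suffixes, key=len, reverse=True):
--         if isinstance(suffix, bytes):
--             suffix = suffix.decode()
--         if tempname.endswith(suffix):
--             return filename[:-len(suffix)], filename[-len(suffix):]
--     return filename, None
-- ===== SOURCE B (Python) =====
-- def split_suffix(filename, suffixes=()):
--     # One pass over the suffixes (no sort): keep the longest matching suffix,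
--     # first-seen wins on equal length (matches A's stable descending sort).
--     tempname = filename.lower()
--     if isinstance(tempname, bytes):
--         tempname = tempname.decode()
--     best_len = -1
--     best = None
--     for suffix in suffixes:
--         raw_len = len(suffix)
--         if isinstance(suffix, bytes):
--             suffix = suffix.decode()
--         if tempname.endswith(suffix) and raw_len > best_len:
--             best_len = raw_len
--             best = (filename[:-len(suffix)], filename[-len(suffix):])
--     return best if best is not None else (filename, None)
-- ===== Notes on version B (the rewrite author's own statement) =====
-- stated objective: simpler
-- what changed: Replaces the length-descending stable sort plus first-match scan with a single unsorted pass that keeps the longest matching suffix (strict > so the earliest equal-length match wins).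
import Mathlib
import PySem

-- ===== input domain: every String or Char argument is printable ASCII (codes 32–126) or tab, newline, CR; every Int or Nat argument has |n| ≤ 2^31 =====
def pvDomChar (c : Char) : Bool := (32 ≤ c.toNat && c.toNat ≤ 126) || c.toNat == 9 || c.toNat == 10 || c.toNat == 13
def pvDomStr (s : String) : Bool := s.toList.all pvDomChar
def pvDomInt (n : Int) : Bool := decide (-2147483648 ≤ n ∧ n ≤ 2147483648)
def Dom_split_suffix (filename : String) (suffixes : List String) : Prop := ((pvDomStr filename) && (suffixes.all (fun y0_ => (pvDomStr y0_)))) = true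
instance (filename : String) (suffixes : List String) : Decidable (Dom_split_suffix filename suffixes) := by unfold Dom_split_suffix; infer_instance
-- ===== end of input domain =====

-- B replaces A's sort-then-scan by one pass keeping the longest matching suffix; return values proved equal.

-- ===== PORT A =====
-- the 'for suffix in sorted(...)' loop with its early return
def splitLoopA (filename tempname : String) : List String → String × Option String
  | [] => (filename, none)
  | suffix :: rest =>
    if PySem.Str.endswith tempname suffix = true then
      (PySem.Str.slice filename none (some (-(PySem.Str.len suffix : Int))),
       some (PySem.Str.slice filename (some (-(PySem.Str.len suffix : Int))) none))
    else splitLoopA filename tempname rest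

def split_suffix (filename : String) (suffixes : List String) : String × Option String :=
  let tempname := PySem.Str.lower filename
  splitLoopA filename tempname (PySem.List.sorted suffixes (fun s => PySem.Str.len s) true)

-- ===== PORT B =====
-- one loop iteration: update (best_len, best) if this suffix matches and is strictly longer
def altStep (filename tempname : String) (st : Int × Option (String × String)) (suffix : String) :
    Int × Option (String × String) :=
  if PySem.Str.endswith tempname suffix = true ∧ st.1 < (PySem.Str.len suffix : Int) then
    ((PySem.Str.len suffix : Int),
     some (PySem.Str.slice filename none (some (-(PySem.Str.len suffix : Int))),
           PySem.Str.slice filename (some (-(PySem.Str.len suffix : Int))) none))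
  else st

def split_suffix_alt (filename : String) (suffixes : List String) : String × Option String :=
  let tempname := PySem.Str.lower filename
  match (suffixes.foldl (altStep filename tempname) (-1, none)).2 with
  | some (base, suf) => (base, some suf)
  | none => (filename, none)

-- ===== PRECONDITION & SPEC =====
def Spec_split_suffix (filename : String) (suffixes : List String) (out : String × Option String) : Prop := out = split_suffix_alt filename suffixes
instance (filename : String) (suffixes : List String) (out : String × Option String) : Decidable (Spec_split_suffix filename suffixes out) := by unfold Spec_split_suffix; infer_instance

-- ===== CLAIM (what is proved, stated in full; the proofs are below) =====
def Claim_equal_split_suffix : Prop := ∀ (filename : String) (suffixes : List String), Dom_split_suffix filename suffixes → Spec_split_suffix filename suffixes (split_suffix filename suffixes)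

-- ===== LEMMAS AND PROOFS =====

-- the best-length accumulator, without the carried output pair
def gstep (tempname : String) (m : Int) (suffix : String) : Int :=
  if PySem.Str.endswith tempname suffix = true ∧ m < (PySem.Str.len suffix : Int) then
    (PySem.Str.len suffix : Int)
  else m

-- the output determined by the winning length (-1 = no match)
def outOf (filename : String) (m : Int) : String × Option String :=
  if m < 0 then (filename, none)
  else (PySem.Str.slice filename none (some (-m)),
        some (PySem.Str.slice filename (some (-m)) none))

def mkOpt (filename : String) (m : Int) : Option (String × String) :=
  if m < 0 then none
  else some (PySem.Str.slice filename none (some (-m)),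
             PySem.Str.slice filename (some (-m)) none)

theorem len_nonneg (s : String) : 0 ≤ PySem.Str.len s := by
  simp only [PySem.Str.len_eq]
  positivity

theorem gstep_const (tempname : String) (m : Int) (l : List String)
    (h : ∀ y ∈ l, PySem.Str.len y ≤ m) : l.foldl (gstep tempname) m = m := by
  induction l with
  | nil => rfl
  | cons s t ih =>
    have hs := h s (by simp)
    have hstep : gstep tempname m s = m := by
      unfold gstep
      exact if_neg (fun hc => absurd hc.2 (not_lt.mpr hs))
    rw [List.foldl_cons, hstep]
    exact ih (fun y hy => h y (List.mem_cons_of_mem _ hy))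

theorem splitLoopA_eq (filename tempname : String) (l : List String)
    (hp : l.Pairwise (fun a b => PySem.Str.len b ≤ PySem.Str.len a)) :
    splitLoopA filename tempname l = outOf filename (l.foldl (gstep tempname) (-1)) := by
  induction l with
  | nil => simp [splitLoopA, outOf]
  | cons s t ih =>
    rcases List.pairwise_cons.mp hp with ⟨hall, htail⟩
    have h0 := len_nonneg s
    by_cases hm : PySem.Str.endswith tempname s = true
    · have h1 : gstep tempname (-1) s = PySem.Str.len s := by
        unfold gstep
        exact if_pos ⟨hm, by omega⟩
      have h2 : t.foldl (gstep tempname) (PySem.Str.len s) = PySem.Str.len s :=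
        gstep_const _ _ _ (fun y hy => hall y hy)
      rw [List.foldl_cons, h1, h2]
      unfold splitLoopA outOf
      rw [if_pos hm, if_neg (not_lt.mpr h0)]
    · have h1 : gstep tempname (-1) s = -1 := by
        unfold gstep
        exact if_neg (fun hc => hm hc.1)
      rw [List.foldl_cons, h1]
      unfold splitLoopA
      rw [if_neg hm]
      exact ih htail

theorem foldl_altStep (filename tempname : String) (l : List String) (m : Int) :
    l.foldl (altStep filename tempname) (m, mkOpt filename m) =
      (l.foldl (gstep tempname) m, mkOpt filename (l.foldl (gstep tempname) m)) := by
  induction l generalizing m with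
  | nil => rfl
  | cons s t ih =>
    by_cases hc : PySem.Str.endswith tempname s = true ∧ m < PySem.Str.len s
    · have hstep : altStep filename tempname (m, mkOpt filename m) s =
          (PySem.Str.len s, mkOpt filename (PySem.Str.len s)) := by
        unfold altStep
        rw [if_pos hc]
        unfold mkOpt
        rw [if_neg (not_lt.mpr (len_nonneg s))]
      have hg : gstep tempname m s = PySem.Str.len s := by
        unfold gstep; exact if_pos hc
      simp only [List.foldl_cons]
      rw [hstep, hg, ih]
    · have hstep : altStep filename tempname (m, mkOpt filename m) s = (m, mkOpt filename m) := by
        unfold altStep; exact if_neg hc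
      have hg : gstep tempname m s = m := by
        unfold gstep; exact if_neg hc
      simp only [List.foldl_cons]
      rw [hstep, hg, ih]

-- ===== VERDICT (by name: the statement is the Claim_ definition above) =====
theorem split_suffix_spec : Claim_equal_split_suffix := by
  intro filename suffixes _
  unfold Spec_split_suffix
  have hsortp : (PySem.List.sorted suffixes (fun s => PySem.Str.len s) true).Pairwise
      (fun a b => PySem.Str.len b ≤ PySem.Str.len a) :=
    PySem.List.sorted_pairwise_rev suffixes (fun s => PySem.Str.len s)
  have hperm : (PySem.List.sorted suffixes (fun s => PySem.Str.len s) true).Perm suffixes :=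
    PySem.List.sorted_perm suffixes _ _
  have hmax : ∀ (t : String) (z : Int) (s : String),
      gstep t z s = if PySem.Str.endswith t s = true then max z (PySem.Str.len s) else z := by
    intro t z s
    unfold gstep
    by_cases h : PySem.Str.endswith t s = true
    · by_cases h2 : z < PySem.Str.len s
      · rw [if_pos (⟨h, h2⟩ : _ ∧ _), if_pos h]
        omega
      · rw [if_neg (fun hc => h2 hc.2), if_pos h]
        omega
    · rw [if_neg (fun hc => h hc.1), if_neg h]
  have hcomm : ∀ x ∈ PySem.List.sorted suffixes (fun s => PySem.Str.len s) true,
      ∀ y ∈ PySem.List.sorted suffixes (fun s => PySem.Str.len s) true, ∀ z : Int,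
      gstep (PySem.Str.lower filename) (gstep (PySem.Str.lower filename) z x) y =
        gstep (PySem.Str.lower filename) (gstep (PySem.Str.lower filename) z y) x := by
    intro x _ y _ z
    simp only [hmax]
    split_ifs <;> first | rfl | omega
  have hA : split_suffix filename suffixes =
      splitLoopA filename (PySem.Str.lower filename)
        (PySem.List.sorted suffixes (fun s => PySem.Str.len s) true) := rfl
  have hB : split_suffix_alt filename suffixes =
      (match (suffixes.foldl (altStep filename (PySem.Str.lower filename))
          ((-1 : Int), mkOpt filename (-1))).2 with
       | some (base, suf) => (base, some suf)
       | none => (filename, none)) := rfl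
  rw [hA, hB, splitLoopA_eq _ _ _ hsortp, hperm.foldl_eq' hcomm (-1),
    foldl_altStep filename (PySem.Str.lower filename) suffixes (-1)]
  by_cases hneg : suffixes.foldl (gstep (PySem.Str.lower filename)) (-1) < 0
  · simp only [outOf, mkOpt, if_pos hneg]
  · simp only [outOf, mkOpt, if_neg hneg]
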